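-- pv_equiv track=rewrite | github.com/goufugui/DaKS_model | knowledge_selector/old/GetRawCorpus.py | get_template_type
-- ===== SOURCE A (Python) =====
-- def get_template_type(s):
--     relation, entity = '', ''
--     in_relation = False
--     for c in s:
--         if c == '-' and not in_relation:
--             in_relation = True
--             continue
--         if c == '-' and in_relation:
--             break
--         if in_relation:
--             relation += c
--         elif c != '<':
--             entity += c
--     return entity, relation
-- ===== SOURCE B (Python) =====
-- def get_template_type(s):
--     parts = s.split('-', 2)
--     entity = parts[0].replace('<', '')
--     relation = parts[1] if len(parts) > 1 else ''
--     return entity, relation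
-- ===== Notes on version B (the rewrite author's own statement) =====
-- stated objective: faster
-- what changed: B replaces A's char-by-char state machine (in_relation flag, continue/break, string += accumulation) with a single split('-', 2), stripping '<' from the first part and taking the second part verbatim as the relation.
import Mathlib
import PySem

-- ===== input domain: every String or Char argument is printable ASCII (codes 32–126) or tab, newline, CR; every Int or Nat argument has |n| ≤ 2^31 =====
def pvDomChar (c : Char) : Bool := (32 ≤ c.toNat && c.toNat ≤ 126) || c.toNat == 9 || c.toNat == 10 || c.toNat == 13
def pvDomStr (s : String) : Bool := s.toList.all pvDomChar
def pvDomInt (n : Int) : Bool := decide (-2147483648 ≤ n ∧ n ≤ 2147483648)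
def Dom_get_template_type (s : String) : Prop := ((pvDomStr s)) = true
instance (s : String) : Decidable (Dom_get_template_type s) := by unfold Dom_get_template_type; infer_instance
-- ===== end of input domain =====

-- B replaces A's char-by-char state machine with one split('-', 2): same return value, plainer and measurably faster (no per-char string +=).

-- ===== PORT A =====
-- A's loop over the characters of s with state (entity, relation, in_relation);
-- returning the pair models Python's `break`.
def pvGoA : List Char → List Char → List Char → Bool → List Char × List Char
  | [], ent, rel, _ => (ent, rel)
  | c :: cs, ent, rel, inRel =>
    if c = '-' ∧ ¬(inRel = true) then pvGoA cs ent rel true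
    else if c = '-' ∧ inRel = true then (ent, rel)
    else if inRel = true then pvGoA cs ent (rel ++ [c]) inRel
    else if c ≠ '<' then pvGoA cs (ent ++ [c]) rel inRel
    else pvGoA cs ent rel inRel

def get_template_type (s : String) : String × String :=
  let p := pvGoA s.toList [] [] false
  (String.ofList p.1, String.ofList p.2)

-- ===== PORT B =====
def get_template_type_alt (s : String) : String × String :=
  let parts := PySem.Chars.splitOnMax s.toList ['-'] 2
  let entity := PySem.Chars.replace (parts.headD []) ['<'] []
  let relation := if 1 < parts.length then parts.getD 1 [] else []
  (String.ofList entity, String.ofList relation)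

-- ===== PRECONDITION & SPEC =====
def Spec_get_template_type (s : String) (out : String × String) : Prop := out = get_template_type_alt s
instance (s : String) (out : String × String) : Decidable (Spec_get_template_type s out) := by unfold Spec_get_template_type; infer_instance

-- ===== CLAIM (what is proved, stated in full; the proofs are below) =====
def Claim_equal_get_template_type : Prop := ∀ (s : String), Dom_get_template_type s → Spec_get_template_type s (get_template_type s)

-- ===== LEMMAS AND PROOFS =====

theorem pv_rep_step (c : Char) (t acc : List Char) (f : Nat) :
    PySem.Chars.replace.go ['<'] [] (f+1) (c::t) acc =
      if '<' = c then PySem.Chars.replace.go ['<'] [] f t acc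
      else PySem.Chars.replace.go ['<'] [] f t (c::acc) := by
  have h : PySem.Chars.replace.go ['<'] [] (f+1) (c::t) acc =
      if ['<'].isPrefixOf (c::t) = true then
        PySem.Chars.replace.go ['<'] [] f (List.drop ['<'].length (c::t)) ([].reverse ++ acc)
      else PySem.Chars.replace.go ['<'] [] f t (c::acc) := rfl
  rw [h]; by_cases hc : '<' = c <;> simp [List.isPrefixOf, hc]

theorem pv_split_step (m : Nat) (c : Char) (t cur : List Char) (acc : List (List Char)) (f : Nat) :
    PySem.Chars.splitOnMax.go ['-'] (f+1) m (c::t) cur acc =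
      if m = 0 then ((cur.reverse ++ (c::t)) :: acc).reverse
      else if '-' = c then PySem.Chars.splitOnMax.go ['-'] f (m-1) t [] (cur.reverse :: acc)
      else PySem.Chars.splitOnMax.go ['-'] f m t (c::cur) acc := by
  have h : PySem.Chars.splitOnMax.go ['-'] (f+1) m (c::t) cur acc =
      if m = 0 then ((cur.reverse ++ (c::t)) :: acc).reverse
      else if ['-'].isPrefixOf (c::t) = true then
        PySem.Chars.splitOnMax.go ['-'] f (m-1) (List.drop ['-'].length (c::t)) [] (cur.reverse :: acc)
      else PySem.Chars.splitOnMax.go ['-'] f m t (c::cur) acc := rfl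
  rw [h]; by_cases hc : '-' = c <;> simp [List.isPrefixOf, hc]

theorem pv_replace_go (l acc : List Char) (fuel : Nat) (h : l.length <= fuel) :
    PySem.Chars.replace.go ['<'] [] fuel l acc = acc.reverse ++ l.filter (· ≠ '<') := by
  induction l generalizing fuel acc with
  | nil => cases fuel <;> simp [PySem.Chars.replace.go]
  | cons c cs ih =>
    cases fuel with
    | zero => simp at h
    | succ f =>
      rw [pv_rep_step]
      by_cases hc : '<' = c
      · rw [if_pos hc, ih _ _ (Nat.le_of_succ_le_succ h)]
        simp [hc.symm]
      · rw [if_neg hc, ih _ _ (Nat.le_of_succ_le_succ h)]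
        simp [List.filter, Ne.symm hc]

theorem pv_replace (l : List Char) :
    PySem.Chars.replace l ['<'] [] = l.filter (· ≠ '<') := by
  unfold PySem.Chars.replace
  rw [if_neg (by simp), pv_replace_go _ _ _ (le_refl _)]
  simp

theorem pv_split_go0 (l cur : List Char) (acc : List (List Char)) (fuel : Nat) :
    PySem.Chars.splitOnMax.go ['-'] fuel 0 l cur acc = ((cur.reverse ++ l) :: acc).reverse := by
  cases fuel with
  | zero => rfl
  | succ f => cases l with
    | nil => simp [PySem.Chars.splitOnMax.go]
    | cons c t => rw [pv_split_step, if_pos rfl]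

theorem pv_split_go_noDash (l cur : List Char) (acc : List (List Char)) (fuel m : Nat)
    (hf : l.length < fuel) (hm : m ≠ 0) (h : '-' ∉ l) :
    PySem.Chars.splitOnMax.go ['-'] fuel m l cur acc = ((cur.reverse ++ l) :: acc).reverse := by
  induction l generalizing fuel cur with
  | nil =>
    cases fuel with
    | zero => simp at hf
    | succ f => simp [PySem.Chars.splitOnMax.go]
  | cons c cs ih =>
    cases fuel with
    | zero => simp at hf
    | succ f =>
      have hc : ¬ ('-' = c) := fun hceq => h (by simp [hceq.symm])
      rw [pv_split_step, if_neg hm, if_neg hc,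
        ih _ _ (Nat.lt_of_succ_lt_succ hf) (fun hx => h (List.mem_cons_of_mem _ hx))]
      simp

theorem pv_split_go1 (l cur : List Char) (acc : List (List Char)) (fuel : Nat)
    (hf : l.length < fuel) :
    PySem.Chars.splitOnMax.go ['-'] fuel 1 l cur acc =
      acc.reverse ++ [cur.reverse ++ l.takeWhile (· ≠ '-')] ++
        (if '-' ∈ l then [(l.dropWhile (· ≠ '-')).drop 1] else []) := by
  induction l generalizing fuel cur with
  | nil =>
    cases fuel with
    | zero => simp at hf
    | succ f => simp [PySem.Chars.splitOnMax.go]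
  | cons c cs ih =>
    cases fuel with
    | zero => simp at hf
    | succ f =>
      by_cases hc : '-' = c
      · rw [pv_split_step, if_neg (by omega), if_pos hc, pv_split_go0]
        simp [List.takeWhile, List.dropWhile, hc.symm]
      · rw [pv_split_step, if_neg (by omega), if_neg hc,
          ih _ _ (Nat.lt_of_succ_lt_succ hf)]
        simp [List.takeWhile, List.dropWhile, hc, Ne.symm hc]

theorem pv_split_go2 (l cur : List Char) (acc : List (List Char)) (fuel : Nat)
    (hf : l.length < fuel) (hm : '-' ∈ l) :
    PySem.Chars.splitOnMax.go ['-'] fuel 2 l cur acc =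
      acc.reverse ++ [cur.reverse ++ l.takeWhile (· ≠ '-')] ++
        ([((l.dropWhile (· ≠ '-')).drop 1).takeWhile (· ≠ '-')] ++
           (if '-' ∈ (l.dropWhile (· ≠ '-')).drop 1 then
              [(((l.dropWhile (· ≠ '-')).drop 1).dropWhile (· ≠ '-')).drop 1] else [])) := by
  induction l generalizing fuel cur with
  | nil => simp at hm
  | cons c cs ih =>
    cases fuel with
    | zero => simp at hf
    | succ f =>
      by_cases hc : '-' = c
      · rw [pv_split_step, if_neg (by omega), if_pos hc,
          pv_split_go1 _ _ _ _ (Nat.lt_of_succ_lt_succ hf)]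
        simp [List.takeWhile, List.dropWhile, hc.symm]
      · have hm' : '-' ∈ cs := by
          cases hm with
          | head => exact absurd rfl hc
          | tail _ hx => exact hx
        rw [pv_split_step, if_neg (by omega), if_neg hc,
          ih _ _ (Nat.lt_of_succ_lt_succ hf) hm']
        simp [List.takeWhile, List.dropWhile, Ne.symm hc]

theorem pv_goA_true (l ent rel : List Char) :
    pvGoA l ent rel true = (ent, rel ++ l.takeWhile (· ≠ '-')) := by
  induction l generalizing rel with
  | nil => simp [pvGoA]
  | cons c cs ih =>
    by_cases hc : c = '-'
    · subst hc; simp [pvGoA, List.takeWhile]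
    · simp only [pvGoA]
      rw [if_neg (by simp [hc]), if_neg (by simp [hc]), if_pos (by trivial), ih]
      simp [List.takeWhile, hc]

theorem pv_goA_false (l ent rel : List Char) :
    pvGoA l ent rel false =
      (ent ++ (l.takeWhile (· ≠ '-')).filter (· ≠ '<'),
       rel ++ ((l.dropWhile (· ≠ '-')).drop 1).takeWhile (· ≠ '-')) := by
  induction l generalizing ent with
  | nil => simp [pvGoA]
  | cons c cs ih =>
    by_cases hc : c = '-'
    · subst hc
      simp only [pvGoA]
      rw [if_pos (by simp), pv_goA_true]
      simp [List.takeWhile, List.dropWhile]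
    · simp only [pvGoA]
      rw [if_neg (by simp [hc]), if_neg (by simp [hc]), if_neg (by simp)]
      by_cases h2 : c = '<'
      · subst h2
        rw [if_neg (by simp), ih]
        simp [List.takeWhile, List.dropWhile, hc]
      · rw [if_pos h2, ih]
        simp [List.takeWhile, List.dropWhile, hc, h2]

-- ===== VERDICT (by name: the statement is the Claim_ definition above) =====
theorem get_template_type_spec : Claim_equal_get_template_type := by
  intro s _
  unfold Spec_get_template_type get_template_type get_template_type_alt
  rw [pv_goA_false]
  unfold PySem.Chars.splitOnMax
  rw [if_neg (by norm_num)]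
  simp only [show Int.toNat 2 = 2 from rfl]
  by_cases hm : '-' ∈ s.toList
  · rw [pv_split_go2 s.toList [] [] (s.toList.length + 1) (by omega) hm]
    simp [pv_replace]
  · rw [pv_split_go_noDash s.toList [] [] (s.toList.length + 1) 2 (by omega) (by norm_num) hm]
    rw [List.takeWhile_eq_self_iff.mpr (fun c hcm => by
      by_contra h; simp at h; exact hm (h ▸ hcm)),
      List.dropWhile_eq_nil_iff.mpr (fun c hcm => by
      by_contra h; simp at h; exact hm (h ▸ hcm))]
    simp [pv_replace]
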